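-- pv_equiv track=rewrite | github.com/lymanhthang/Vietnam-License-Plate-Recognize | ocr_train/test.py | sort_bounding_boxes_top_to_bottom_then_left_to_right
-- ===== SOURCE A (Python) =====
-- def sort_bounding_boxes_top_to_bottom_then_left_to_right(boxes, y_threshold=15):
--     boxes = sorted(boxes, key=lambda b: b[1])  # Sắp theo y (từ trên xuống)
--     rows = []
--     current_row = [boxes[0]]
--
--     for box in boxes[1:]:
--         if abs(box[1] - current_row[0][1]) <= y_threshold:
--             current_row.append(box)
--         else:
--             rows.append(sorted(current_row, key=lambda b: b[0]))  # trái sang phải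
--             current_row = [box]
--     rows.append(sorted(current_row, key=lambda b: b[0]))
--
--     # Gộp tất cả các hàng lại
--     sorted_boxes = [box for row in rows for box in row]
--     return sorted_boxes
-- ===== SOURCE B (Python) =====
-- def _first_beyond(ys, x, lo, hi):
--     # smallest j in [lo, hi] with ys[j] > x (ys nondecreasing on [lo, hi))
--     while lo < hi:
--         mid = (lo + hi) // 2
--         if x < ys[mid]:
--             hi = mid
--         else:
--             lo = mid + 1
--     return lo
--
--
-- def sort_bounding_boxes_top_to_bottom_then_left_to_right(boxes, y_threshold=15):
--     bs = sorted(boxes, key=lambda b: b[1])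
--     ys = [b[1] for b in bs]
--     n = len(bs)
--     out = []
--     i = 0
--     while i < n:
--         j = _first_beyond(ys, ys[i] + y_threshold, i + 1, n)
--         out.extend(sorted(bs[i:j], key=lambda b: b[0]))
--         i = j
--     return out
-- ===== Notes on version B (the rewrite author's own statement) =====
-- stated objective: alternative
-- what changed: Instead of a linear box-by-box scan that accumulates per-row lists and flattens, B exploits that the y-sorted list makes each row a contiguous maximal prefix: it finds each row's end with a binary search on the y keys, sorts that contiguous slice by x and appends it, jumping row boundary to row boundary.
import Mathlib
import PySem

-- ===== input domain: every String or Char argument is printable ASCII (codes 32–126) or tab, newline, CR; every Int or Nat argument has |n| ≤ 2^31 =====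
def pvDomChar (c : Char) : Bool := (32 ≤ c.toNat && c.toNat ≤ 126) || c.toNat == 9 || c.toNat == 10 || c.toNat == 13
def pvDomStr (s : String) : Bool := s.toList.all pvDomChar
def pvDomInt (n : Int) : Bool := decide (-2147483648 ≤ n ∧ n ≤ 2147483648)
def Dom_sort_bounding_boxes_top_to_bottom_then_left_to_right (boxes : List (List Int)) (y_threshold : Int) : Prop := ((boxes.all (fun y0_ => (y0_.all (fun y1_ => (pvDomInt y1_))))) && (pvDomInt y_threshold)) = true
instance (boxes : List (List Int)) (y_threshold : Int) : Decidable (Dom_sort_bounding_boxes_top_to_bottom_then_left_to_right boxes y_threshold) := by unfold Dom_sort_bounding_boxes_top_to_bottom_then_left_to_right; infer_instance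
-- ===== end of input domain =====

-- B exploits that after the y-sort each row is a contiguous maximal block: it finds each
-- row's end with a binary search on the y keys and emits the x-sorted slice, instead of
-- A's box-by-box scan accumulating per-row lists and flattening. Objective: alternative.

-- b[1] / b[0] (Python raises IndexError on short boxes; Pre_ requires length ≥ 2)
def pvYKey (b : List Int) : Int := PySem.List.pyGetD b 1 0
def pvXKey (b : List Int) : Int := PySem.List.pyGetD b 0 0
-- sorted(row, key=lambda b: b[0])
def pvSortX (r : List (List Int)) : List (List Int) := PySem.List.sorted r pvXKey

-- ===== PORT A =====
def sort_bounding_boxes_top_to_bottom_then_left_to_right (boxes : List (List Int)) (y_threshold : Int) : List (List Int) :=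
  let bs := PySem.List.sorted boxes pvYKey
  match bs with
  | [] => []   -- Python: boxes[0] raises IndexError here; excluded by Pre_
  | b0 :: rest =>
    -- state: (rows, current_row); current_row[0] ported as headD []
    let st := rest.foldl (fun st box =>
        if |pvYKey box - pvYKey (st.2.headD [])| ≤ y_threshold then
          (st.1, st.2 ++ [box])
        else
          (st.1 ++ [pvSortX st.2], [box]))
      (([] : List (List (List Int))), [b0])
    (st.1 ++ [pvSortX st.2]).flatten

-- ===== PORT B =====
-- _first_beyond: binary search, smallest j in [lo, hi] with ys[j] > x
-- (the while loop runs on fuel = ys.length, an upper bound on hi - lo, so the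
-- recursion is structural; with that much fuel the guard lo < hi always ends it)
def pvFirstBeyond (ys : List Int) (x : Int) : Nat → Nat → Nat → Nat
  | 0, lo, _ => lo
  | fuel + 1, lo, hi =>
    if lo < hi then
      let mid := (lo + hi) / 2
      if x < ys.getD mid 0 then pvFirstBeyond ys x fuel lo mid   -- ys[mid] in range whenever hi ≤ len ys
      else pvFirstBeyond ys x fuel (mid + 1) hi
    else lo

-- the while loop of B: emit the x-sorted row slice bs[i:j], continue at j
-- (fuel = bs.length - i bounds the number of iterations; each row is nonempty)
def pvGoB (bs : List (List Int)) (ys : List Int) (t : Int) : Nat → Nat → List (List Int)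
  | 0, _ => []
  | fuel + 1, i =>
    if i < bs.length then
      let j := pvFirstBeyond ys (ys.getD i 0 + t) ys.length (i + 1) ys.length   -- ys[i]: in range by the loop guard
      pvSortX (PySem.List.slice bs (some (i : Int)) (some (j : Int))) ++ pvGoB bs ys t fuel j
    else []

def sort_bounding_boxes_top_to_bottom_then_left_to_right_alt (boxes : List (List Int)) (y_threshold : Int) : List (List Int) :=
  let bs := PySem.List.sorted boxes pvYKey
  let ys := bs.map pvYKey
  pvGoB bs ys y_threshold bs.length 0

-- ===== PRECONDITION & SPEC =====
-- Pre_ excludes exactly the inputs on which Python A raises IndexError: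
-- empty boxes (boxes[0]) and boxes containing a box with fewer than 2 entries (b[1]).
def Pre_sort_bounding_boxes_top_to_bottom_then_left_to_right (boxes : List (List Int)) (y_threshold : Int) : Prop :=
  boxes ≠ [] ∧ ∀ b ∈ boxes, 2 ≤ b.length
instance (boxes : List (List Int)) (y_threshold : Int) : Decidable (Pre_sort_bounding_boxes_top_to_bottom_then_left_to_right boxes y_threshold) := by unfold Pre_sort_bounding_boxes_top_to_bottom_then_left_to_right; infer_instance

def pvWitness_sort_bounding_boxes_top_to_bottom_then_left_to_right : List (List Int) × Int := ([[30, 2], [5, 40], [12, 1]], 15)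

def Spec_sort_bounding_boxes_top_to_bottom_then_left_to_right (boxes : List (List Int)) (y_threshold : Int) (out : List (List Int)) : Prop := out = sort_bounding_boxes_top_to_bottom_then_left_to_right_alt boxes y_threshold
instance (boxes : List (List Int)) (y_threshold : Int) (out : List (List Int)) : Decidable (Spec_sort_bounding_boxes_top_to_bottom_then_left_to_right boxes y_threshold out) := by unfold Spec_sort_bounding_boxes_top_to_bottom_then_left_to_right; infer_instance

-- ===== CLAIM (what is proved, stated in full; the proofs are below) =====
def Claim_equal_sort_bounding_boxes_top_to_bottom_then_left_to_right : Prop := ∀ (boxes : List (List Int)) (y_threshold : Int), Dom_sort_bounding_boxes_top_to_bottom_then_left_to_right boxes y_threshold → Pre_sort_bounding_boxes_top_to_bottom_then_left_to_right boxes y_threshold → Spec_sort_bounding_boxes_top_to_bottom_then_left_to_right boxes y_threshold (sort_bounding_boxes_top_to_bottom_then_left_to_right boxes y_threshold)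

-- ===== LEMMAS AND PROOFS =====

-- membership in a row (in y-sorted order) as a Bool: y within threshold of the row's first box
def pvP (t : Int) (b x : List Int) : Bool := pvYKey x ≤ pvYKey b + t

-- the rows of a y-sorted list: each row is the maximal prefix within threshold of its first box
def pvRows (t : Int) : List (List Int) → List (List (List Int))
  | [] => []
  | b :: rest => (b :: rest.takeWhile (pvP t b)) :: pvRows t (rest.dropWhile (pvP t b))
termination_by l => l.length
decreasing_by
  have := List.length_dropWhile_le (pvP t b) rest
  simpa using Nat.lt_succ_of_le this

-- the pure grouping step (A's step without the per-row sort)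
def pvStepG (t : Int) (st : List (List (List Int)) × List (List Int)) (box : List Int) : List (List (List Int)) × List (List Int) :=
  if |pvYKey box - pvYKey (st.2.headD [])| ≤ t then (st.1, st.2 ++ [box]) else (st.1 ++ [st.2], [box])

-- A's fold equals the pure grouping fold with rows sorted afterwards
theorem pvA_fold (t : Int) (rest : List (List Int)) :
    ∀ (g : List (List (List Int))) (cur : List (List Int)),
    rest.foldl (fun st box =>
        if |pvYKey box - pvYKey (st.2.headD [])| ≤ t then
          (st.1, st.2 ++ [box])
        else
          (st.1 ++ [pvSortX st.2], [box])) (g.map pvSortX, cur)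
      = ((rest.foldl (pvStepG t) (g, cur)).1.map pvSortX, (rest.foldl (pvStepG t) (g, cur)).2) := by
  induction rest with
  | nil => intro g cur; simp
  | cons box rest ih =>
    intro g cur
    simp only [List.foldl_cons, pvStepG]
    by_cases h : |pvYKey box - pvYKey (cur.headD [])| ≤ t
    · rw [if_pos h, if_pos h]
      exact ih g (cur ++ [box])
    · rw [if_neg h, if_neg h]
      have e : List.map pvSortX g ++ [pvSortX cur] = List.map pvSortX (g ++ [cur]) := by simp
      rw [e]
      exact ih (g ++ [cur]) [box]

-- the grouping fold realises pvRows: on a y-sorted tail, closed rows ++ current row = the rows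
theorem pvGroup_eq (t : Int) : ∀ (rest : List (List Int)) (g : List (List (List Int))) (c : List Int) (acc : List (List Int)),
    rest.Pairwise (fun a b => pvYKey a ≤ pvYKey b) → (∀ x ∈ rest, pvYKey c ≤ pvYKey x) →
    (rest.foldl (pvStepG t) (g, c :: acc)).1 ++ [(rest.foldl (pvStepG t) (g, c :: acc)).2]
      = g ++ ((c :: (acc ++ rest.takeWhile (pvP t c))) :: pvRows t (rest.dropWhile (pvP t c))) := by
  intro rest
  induction rest with
  | nil => intro g c acc _ _; simp [pvRows]
  | cons x xs ih =>
    intro g c acc hpw hge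
    have hcx : pvYKey c ≤ pvYKey x := hge x (by simp)
    have habs : |pvYKey x - pvYKey ((c :: acc).headD [])| = pvYKey x - pvYKey c := by
      simp only [List.headD_cons]
      exact abs_of_nonneg (by omega)
    rcases List.pairwise_cons.mp hpw with ⟨hxall, hxs⟩
    simp only [List.foldl_cons, pvStepG, habs]
    by_cases hp : pvP t c x = true
    · have hle : pvYKey x - pvYKey c ≤ t := by simp [pvP] at hp; omega
      rw [if_pos hle]
      have : (c :: acc) ++ [x] = c :: (acc ++ [x]) := by simp
      rw [this]
      have := ih g c (acc ++ [x]) hxs (fun z hz => le_trans hcx (hxall z hz))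
      simpa [hp, List.takeWhile_cons, List.dropWhile_cons, List.append_assoc] using this
    · have hpf : pvP t c x = false := by simpa using hp
      have hgt : ¬ pvYKey x - pvYKey c ≤ t := by simp [pvP] at hpf; omega
      rw [if_neg hgt]
      have := ih (g ++ [c :: acc]) x [] hxs hxall
      simp only [List.nil_append] at this
      rw [this]
      simp [List.takeWhile_cons, List.dropWhile_cons, hpf, pvRows, List.append_assoc]

-- l.take/drop at the takeWhile length recover takeWhile/dropWhile
theorem pvTake_takeWhile {α : Type} (p : α → Bool) (l : List α) : l.take (l.takeWhile p).length = l.takeWhile p := by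
  induction l with
  | nil => rfl
  | cons a l ih =>
    by_cases h : p a = true
    · simp [List.takeWhile_cons, h, ih]
    · simp [List.takeWhile_cons, h]

theorem pvDrop_takeWhile {α : Type} (p : α → Bool) (l : List α) : l.drop (l.takeWhile p).length = l.dropWhile p := by
  induction l with
  | nil => rfl
  | cons a l ih =>
    by_cases h : p a = true
    · simp [List.takeWhile_cons, List.dropWhile_cons, h, ih]
    · simp [List.takeWhile_cons, List.dropWhile_cons, h]

-- takeWhile over an append, when the predicate fails everywhere on the right part
theorem pvTakeWhile_append_false {α : Type} (p : α → Bool) (l1 l2 : List α)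
    (h : ∀ z ∈ l2, p z = false) : (l1 ++ l2).takeWhile p = l1.takeWhile p := by
  induction l1 with
  | nil =>
    cases l2 with
    | nil => rfl
    | cons a l => simp [List.takeWhile_cons, h a (by simp)]
  | cons a l ih =>
    by_cases ha : p a = true
    · simp [List.takeWhile_cons, ha, ih]
    · simp [List.takeWhile_cons, ha]

-- takeWhile over an append, when the predicate holds everywhere on the left part
theorem pvTakeWhile_append_true {α : Type} (p : α → Bool) (l1 l2 : List α)
    (h : ∀ z ∈ l1, p z = true) : (l1 ++ l2).takeWhile p = l1 ++ l2.takeWhile p := by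
  induction l1 with
  | nil => rfl
  | cons a l ih =>
    simp [List.takeWhile_cons, h a (by simp), ih (fun z hz => h z (by simp [hz]))]

-- binary-search correctness on a nondecreasing list: result = lo + length of the ≤x prefix of [lo,hi)
theorem pvFirstBeyond_spec (ys : List Int) (x : Int) (hpw : ys.Pairwise (· ≤ ·)) :
    ∀ fuel lo hi, hi - lo ≤ fuel → lo ≤ hi → hi ≤ ys.length →
    pvFirstBeyond ys x fuel lo hi = lo + (((ys.drop lo).take (hi - lo)).takeWhile (fun v => decide (v ≤ x))).length := by
  have hmono : ∀ p q : Nat, (hpq : p ≤ q) → (hq : q < ys.length) → ys[p]'(by omega) ≤ ys[q] := by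
    intro p q hpq hq
    rcases Nat.eq_or_lt_of_le hpq with rfl | hlt
    · exact le_refl _
    · exact List.pairwise_iff_getElem.mp hpw p q (by omega) hq hlt
  intro fuel
  induction fuel with
  | zero =>
    intro lo hi h hle hlen
    have : hi = lo := by omega
    subst this
    simp [pvFirstBeyond]
  | succ fuel ih =>
    intro lo hi h hle hlen
    show (if lo < hi then
        (if x < ys.getD ((lo + hi) / 2) 0 then pvFirstBeyond ys x fuel lo ((lo + hi) / 2)
         else pvFirstBeyond ys x fuel ((lo + hi) / 2 + 1) hi)
      else lo) = _
    by_cases hlt : lo < hi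
    · rw [if_pos hlt]
      set mid := (lo + hi) / 2 with hmid
      have hmlo : lo ≤ mid := by omega
      have hmhi : mid < hi := by omega
      have hmlen : mid < ys.length := by omega
      have hysmid : ys.getD mid 0 = ys[mid] := List.getD_eq_getElem ys 0 hmlen
      -- split the segment at mid / mid+1
      by_cases hx : x < ys.getD mid 0
      · rw [if_pos hx]
        rw [ih lo mid (by omega) hmlo (by omega)]
        congr 2
        have hsplit : (ys.drop lo).take (hi - lo)
            = (ys.drop lo).take (mid - lo) ++ ((ys.drop lo).drop (mid - lo)).take (hi - mid) := by
          rw [← List.take_add]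
          congr 1
          omega
        rw [hsplit, pvTakeWhile_append_false]
        intro z hz
        have hz' : z ∈ ys.drop mid := by
          have : (ys.drop lo).drop (mid - lo) = ys.drop mid := by
            rw [List.drop_drop]; congr 1; omega
          rw [this] at hz
          exact List.mem_of_mem_take hz
        -- every element of ys.drop mid is ≥ ys[mid] > x
        have hcons : ys.drop mid = ys[mid] :: ys.drop (mid + 1) := List.drop_eq_getElem_cons hmlen
        have hge : ys[mid] ≤ z := by
          rw [hcons] at hz'
          rcases List.mem_cons.mp hz' with rfl | hz''
          · exact le_refl _
          · have hpd : (ys.drop mid).Pairwise (· ≤ ·) := List.Pairwise.drop hpw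
            rw [hcons] at hpd
            exact (List.pairwise_cons.mp hpd).1 z hz''
        rw [hysmid] at hx
        simp
        omega
      · rw [if_neg hx]
        rw [ih (mid + 1) hi (by omega) (by omega) hlen]
        rw [hysmid] at hx
        have hxm : ys[mid] ≤ x := by omega
        have hsplit : (ys.drop lo).take (hi - lo)
            = (ys.drop lo).take (mid + 1 - lo) ++ ((ys.drop lo).drop (mid + 1 - lo)).take (hi - (mid + 1)) := by
          rw [← List.take_add]
          congr 1
          omega
        have hdd : (ys.drop lo).drop (mid + 1 - lo) = ys.drop (mid + 1) := by
          rw [List.drop_drop]; congr 1; omega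
        rw [hsplit, hdd, pvTakeWhile_append_true]
        · have hlentake : ((ys.drop lo).take (mid + 1 - lo)).length = mid + 1 - lo := by
            simp
            omega
          rw [List.length_append, hlentake]
          omega
        · intro z hz
          rcases List.mem_iff_getElem.mp hz with ⟨k, hk, rfl⟩
          have hk' : k < mid + 1 - lo := by
            have := hk
            simp at this
            omega
          have hidx : ((ys.drop lo).take (mid + 1 - lo))[k]'hk = ys[lo + k]'(by simp at hk ⊢; omega) := by
            rw [List.getElem_take, List.getElem_drop]
          rw [hidx]
          have : ys[lo + k]'(by simp at hk; omega) ≤ ys[mid] := hmono (lo + k) mid (by omega) hmlen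
          simp
          omega
    · rw [if_neg hlt]
      have : hi = lo := by omega
      subst this
      simp

-- the binary search never goes below lo
theorem pvFirstBeyond_ge (ys : List Int) (x : Int) : ∀ fuel lo hi, lo ≤ pvFirstBeyond ys x fuel lo hi := by
  intro fuel
  induction fuel with
  | zero => intro lo hi; exact le_refl lo
  | succ fuel ih =>
    intro lo hi
    show lo ≤ (if lo < hi then
        (if x < ys.getD ((lo + hi) / 2) 0 then pvFirstBeyond ys x fuel lo ((lo + hi) / 2)
         else pvFirstBeyond ys x fuel ((lo + hi) / 2 + 1) hi)
      else lo)
    by_cases hlt : lo < hi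
    · rw [if_pos hlt]
      by_cases hx : x < ys.getD ((lo + hi) / 2) 0
      · rw [if_pos hx]; exact ih lo ((lo + hi) / 2)
      · rw [if_neg hx]
        have := ih ((lo + hi) / 2 + 1) hi
        omega
    · rw [if_neg hlt]

-- B's loop from index i computes the sorted-flattened rows of the remaining suffix
theorem pvGoB_eq (bs : List (List Int)) (t : Int)
    (hpw : (bs.map pvYKey).Pairwise (· ≤ ·)) :
    ∀ fuel i, bs.length - i ≤ fuel →
    pvGoB bs (bs.map pvYKey) t fuel i = ((pvRows t (bs.drop i)).map pvSortX).flatten := by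
  intro fuel
  induction fuel with
  | zero =>
    intro i h
    rw [List.drop_eq_nil_of_le (by omega)]
    simp [pvGoB, pvRows]
  | succ fuel ih =>
    intro i h
    set ys := bs.map pvYKey with hys
    show (if i < bs.length then
        pvSortX (PySem.List.slice bs (some (i : Int))
          (some ((pvFirstBeyond ys (ys.getD i 0 + t) ys.length (i + 1) ys.length : Nat) : Int)))
          ++ pvGoB bs ys t fuel (pvFirstBeyond ys (ys.getD i 0 + t) ys.length (i + 1) ys.length)
      else []) = _
    by_cases hi : i < bs.length
    · rw [if_pos hi]
      have hylen : ys.length = bs.length := by simp [hys]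
      have hysi : ys.getD i 0 = pvYKey (bs[i]'hi) := by
        rw [List.getD_eq_getElem ys 0 (by omega)]
        simp [hys]
      set x := ys.getD i 0 + t with hx
      set j := pvFirstBeyond ys x ys.length (i + 1) ys.length with hj
      -- the binary search lands at i+1 + (length of the within-threshold prefix)
      have hspec := pvFirstBeyond_spec ys x hpw ys.length (i + 1) ys.length (by omega) (by omega) (le_refl _)
      have htake : (ys.drop (i + 1)).take (ys.length - (i + 1)) = ys.drop (i + 1) := by
        apply List.take_of_length_le
        simp
      rw [htake] at hspec
      -- identify the y-prefix with the box-prefix through map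
      have hdropmap : ys.drop (i + 1) = (bs.drop (i + 1)).map pvYKey := by
        simp [hys]
      have htwmap : (ys.drop (i + 1)).takeWhile (fun v => decide (v ≤ x))
          = ((bs.drop (i + 1)).takeWhile (pvP t (bs[i]'hi))).map pvYKey := by
        rw [hdropmap, List.takeWhile_map]
        have hfn : ((fun v => decide (v ≤ x)) ∘ pvYKey) = pvP t (bs[i]'hi) := by
          funext b
          simp only [Function.comp_apply, pvP, hx, hysi]
        rw [hfn]
      set k := ((bs.drop (i + 1)).takeWhile (pvP t (bs[i]'hi))).length with hk
      have hjval : j = i + 1 + k := by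
        rw [hj, hspec, htwmap]
        simp [hk]
      -- slice bs[i:j] is the row
      have hdropi : bs.drop i = (bs[i]'hi) :: bs.drop (i + 1) := List.drop_eq_getElem_cons hi
      have hslice : PySem.List.slice bs (some (i : Int)) (some (j : Int))
          = (bs[i]'hi) :: (bs.drop (i + 1)).takeWhile (pvP t (bs[i]'hi)) := by
        rw [PySem.List.slice_natCast, hdropi, hjval]
        have : i + 1 + k - i = k + 1 := by omega
        rw [this, List.take_succ_cons]
        rw [hk, pvTake_takeWhile]
      have hdropj : bs.drop j = (bs.drop (i + 1)).dropWhile (pvP t (bs[i]'hi)) := by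
        rw [hjval, ← pvDrop_takeWhile (pvP t (bs[i]'hi)) (bs.drop (i + 1)), ← hk]
        rw [← List.drop_drop]
      have hrows : pvRows t (bs.drop i)
          = ((bs[i]'hi) :: (bs.drop (i + 1)).takeWhile (pvP t (bs[i]'hi)))
              :: pvRows t ((bs.drop (i + 1)).dropWhile (pvP t (bs[i]'hi))) := by
        rw [hdropi, pvRows]
      have hji : i + 1 ≤ j := pvFirstBeyond_ge ys x ys.length (i + 1) ys.length
      rw [hslice, ih j (by omega), hdropj, hrows]
      simp
    · rw [if_neg hi]
      rw [List.drop_eq_nil_of_le (by omega)]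
      simp [pvRows]

-- ===== VERDICT (by name: the statement is the Claim_ definition above) =====
theorem sort_bounding_boxes_top_to_bottom_then_left_to_right_spec : Claim_equal_sort_bounding_boxes_top_to_bottom_then_left_to_right := by
  intro boxes t _ _
  unfold Spec_sort_bounding_boxes_top_to_bottom_then_left_to_right
  unfold sort_bounding_boxes_top_to_bottom_then_left_to_right
  unfold sort_bounding_boxes_top_to_bottom_then_left_to_right_alt
  have hpwk : ((PySem.List.sorted boxes pvYKey).map pvYKey).Pairwise (· ≤ ·) :=
    PySem.List.sorted_map_key_pairwise boxes pvYKey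
  cases hbs : PySem.List.sorted boxes pvYKey with
  | nil =>
    rw [hbs] at hpwk
    rfl
  | cons b0 rest =>
    rw [hbs] at hpwk
    simp only []
    have hA := pvA_fold t rest [] [b0]
    simp only [List.map_nil] at hA
    rw [hA]
    have hpwbs : (b0 :: rest).Pairwise (fun a b => pvYKey a ≤ pvYKey b) := by
      rw [← List.pairwise_map (f := pvYKey)]
      exact hpwk
    rcases List.pairwise_cons.mp hpwbs with ⟨hb0, hrest⟩
    have hG := pvGroup_eq t rest [] b0 [] hrest hb0
    simp only [List.nil_append] at hG
    have hB := pvGoB_eq (b0 :: rest) t (by simpa using hpwk) ((b0 :: rest).length) 0 (by omega)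
    simp only [List.drop_zero] at hB
    rw [hB]
    rw [pvRows]
    rw [← hG]
    simp [List.map_append]
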